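-- pv_equiv track=rewrite | github.com/imsoncod/Python-Algorithm | Programmers/숫자 게임.py | solution
-- ===== SOURCE A (Python) =====
-- def solution(A, B):
--     ans = 0
--     A.sort()
--     B.sort()
--     for i in A:
--         for j in B:
--             if i<j:
--                 ans+=1
--                 B.remove(j)
--                 break
--     return ans
-- ===== SOURCE B (Python) =====
-- def solution(A, B):
--     # Two-pointer greedy over sorted copies: for each x of sorted(A), take the
--     # smallest not-yet-used element of sorted(B) that is > x.
--     a = sorted(A)
--     b = sorted(B)
--     ans = 0
--     j = 0
--     for x in a:
--         while j < len(b) and b[j] <= x: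
--             j += 1
--         if j >= len(b):
--             break
--         ans += 1
--         j += 1
--     return ans
-- ===== Notes on version B (the rewrite author's own statement) =====
-- stated objective: faster
-- what changed: Replaces the nested scan with B.remove per A-element by a single two-pointer greedy sweep over the two sorted arrays.
import Mathlib
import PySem

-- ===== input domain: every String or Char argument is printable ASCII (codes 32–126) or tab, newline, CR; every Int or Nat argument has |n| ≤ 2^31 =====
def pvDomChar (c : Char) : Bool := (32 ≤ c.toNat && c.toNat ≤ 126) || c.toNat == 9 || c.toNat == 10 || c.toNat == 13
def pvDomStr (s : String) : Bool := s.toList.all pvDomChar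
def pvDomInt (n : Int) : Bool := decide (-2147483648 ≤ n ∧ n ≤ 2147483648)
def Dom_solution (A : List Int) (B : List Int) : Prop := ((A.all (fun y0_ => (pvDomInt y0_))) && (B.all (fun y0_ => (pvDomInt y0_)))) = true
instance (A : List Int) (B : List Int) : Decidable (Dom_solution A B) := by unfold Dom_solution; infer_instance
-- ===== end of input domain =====

-- B replaces A's nested scan (with B.remove) by a two-pointer greedy over the sorted arrays
-- (measured asymptotically faster). A sorts its arguments in place; equivalence here is about
-- the RETURN value only (B does not mutate its arguments).


-- ===== PORT A =====
-- inner 'for j in B: if i<j: … break' — scan for the first j with i<j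
def pvFindGT (i : Int) : List Int → Option Int
  | [] => none
  | j :: rest => if i < j then some j else pvFindGT i rest

-- one iteration of the outer loop: state = (ans, current B)
def pvStepA (st : Int × List Int) (i : Int) : Int × List Int :=
  match pvFindGT i st.2 with
  | none => st
  | some j => (st.1 + 1, (PySem.List.remove? st.2 j).getD st.2)   -- B.remove(j); remove? is some here

def solution (A : List Int) (B : List Int) : Int :=
  (List.foldl pvStepA (0, PySem.List.sorted B (fun x => x) false)
      (PySem.List.sorted A (fun x => x) false)).1

-- ===== PORT B =====
-- the two index cursors of Source B rendered as list consumption: first list = remaining a,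
-- second list = b[j:]
def pvGo : List Int → List Int → Int
  | [], _ => 0
  | _ :: _, [] => 0
  | a :: as, b :: bs => if a < b then 1 + pvGo as bs else pvGo (a :: as) bs

def solution_alt (A : List Int) (B : List Int) : Int :=
  pvGo (PySem.List.sorted A (fun x => x) false) (PySem.List.sorted B (fun x => x) false)

-- ===== PRECONDITION & SPEC =====
def Spec_solution (A : List Int) (B : List Int) (out : Int) : Prop := out = solution_alt A B
instance (A : List Int) (B : List Int) (out : Int) : Decidable (Spec_solution A B out) := by unfold Spec_solution; infer_instance

-- ===== CLAIM (what is proved, stated in full; the proofs are below) =====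
def Claim_equal_solution : Prop := ∀ (A : List Int) (B : List Int), Dom_solution A B → Spec_solution A B (solution A B)

-- ===== LEMMAS AND PROOFS =====

-- proof-side characterisation of A's inner loop: remove the first element > i
def pvRem (i : Int) : List Int → Option (List Int)
  | [] => none
  | b :: bs => if i < b then some bs else (pvRem i bs).map (b :: ·)

-- proof-side characterisation of A's outer loop
def pvF : List Int → List Int → Int
  | [], _ => 0
  | a :: as, bs => match pvRem a bs with
    | none => pvF as bs
    | some bs' => 1 + pvF as bs'

theorem pvFindGT_none_iff (i : Int) (bs : List Int) :
    pvFindGT i bs = none ↔ pvRem i bs = none := by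
  induction bs with
  | nil => simp [pvFindGT, pvRem]
  | cons b bs ih =>
    by_cases h : i < b <;> simp [pvFindGT, pvRem, h, ih]

theorem pvFindGT_gt (i j : Int) (bs : List Int) (h : pvFindGT i bs = some j) : i < j := by
  induction bs with
  | nil => simp [pvFindGT] at h
  | cons b bs ih =>
    by_cases hb : i < b
    · simp [pvFindGT, hb] at h; omega
    · simp [pvFindGT, hb] at h; exact ih h

theorem remove?_of_findGT (i j : Int) (bs : List Int) (h : pvFindGT i bs = some j) :
    PySem.List.remove? bs j = pvRem i bs := by
  induction bs with
  | nil => simp [pvFindGT] at h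
  | cons b bs ih =>
    by_cases hb : i < b
    · simp [pvFindGT, hb] at h
      subst h
      simp [PySem.List.remove?_cons_self, pvRem, hb]
    · simp [pvFindGT, hb] at h
      have hij : i < j := pvFindGT_gt i j bs h
      have hbj : b ≠ j := by omega
      rw [PySem.List.remove?_cons_of_ne (xs := bs) hbj, ih h]
      simp [pvRem, hb]

theorem pvStepA_eq (ans : Int) (bs : List Int) (i : Int) :
    pvStepA (ans, bs) i =
      match pvRem i bs with
      | none => (ans, bs)
      | some bs' => (ans + 1, bs') := by
  unfold pvStepA
  cases hf : pvFindGT i bs with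
  | none =>
    rw [(pvFindGT_none_iff i bs).mp hf]
  | some j =>
    have := remove?_of_findGT i j bs hf
    cases hr : pvRem i bs with
    | none =>
      exact absurd ((pvFindGT_none_iff i bs).mpr hr) (by simp [hf])
    | some bs' => rw [hr] at this; simp [this]

theorem foldl_stepA (as : List Int) : ∀ (ans : Int) (bs : List Int),
    (List.foldl pvStepA (ans, bs) as).1 = ans + pvF as bs := by
  induction as with
  | nil => intro ans bs; simp [pvF]
  | cons a as ih =>
    intro ans bs
    rw [List.foldl_cons, pvStepA_eq]
    cases hr : pvRem a bs with
    | none => simp [pvF, hr, ih]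
    | some bs' => simp [pvF, hr, ih]; ring

theorem pvF_nil (as : List Int) : pvF as [] = 0 := by
  induction as with
  | nil => rfl
  | cons a as ih => simp [pvF, pvRem, ih]

theorem pvF_skip (b : Int) (as : List Int) (hb : ∀ a ∈ as, b ≤ a) :
    ∀ bs, pvF as (b :: bs) = pvF as bs := by
  induction as with
  | nil => intro bs; rfl
  | cons a as ih =>
    intro bs
    have hba : ¬ a < b := by have := hb a (by simp); omega
    have hb' : ∀ a ∈ as, b ≤ a := fun a ha => hb a (by simp [ha])
    cases hr : pvRem a bs with
    | none => simp [pvF, pvRem, hba, hr, ih hb']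
    | some bs' => simp [pvF, pvRem, hba, hr, ih hb']

theorem pvGo_eq_pvF (as : List Int) (hs : as.Pairwise (· ≤ ·)) :
    ∀ bs, pvGo as bs = pvF as bs := by
  induction as with
  | nil => intro bs; cases bs <;> rfl
  | cons a as ih =>
    have ha : ∀ a' ∈ as, a ≤ a' := (List.pairwise_cons.mp hs).1
    have hs' : as.Pairwise (· ≤ ·) := (List.pairwise_cons.mp hs).2
    intro bs
    induction bs with
    | nil => simp [pvGo, pvF, pvRem, pvF_nil]
    | cons b bs ihb =>
      by_cases hab : a < b
      · simp [pvGo, hab, pvF, pvRem, ih hs' bs]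
      · have hba : ∀ a' ∈ as, b ≤ a' := by
          intro a' ha'; have := ha a' ha'; omega
        rw [show pvGo (a :: as) (b :: bs) = pvGo (a :: as) bs by simp [pvGo, hab], ihb]
        cases hr : pvRem a bs with
        | none => simp [pvF, pvRem, hab, hr, pvF_skip b as hba]
        | some bs' => simp [pvF, pvRem, hab, hr, pvF_skip b as hba]

-- ===== VERDICT (by name: the statement is the Claim_ definition above) =====
theorem solution_spec : Claim_equal_solution := by
  intro A B _
  unfold Spec_solution solution solution_alt
  rw [foldl_stepA, pvGo_eq_pvF _ (PySem.List.sorted_pairwise A (fun x => x))]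
  simp
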